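-- pv_equiv track=rewrite | github.com/sanchitsingh001/NarrativeWorlds | world_entity_layout_llm_v3.py | _candidate_indices_around
-- ===== SOURCE A (Python) =====
-- def _candidate_indices_around(idx0: int, tiles: int, radius: int = 4) -> list[int]:
--     lo = max(0, idx0 - radius)
--     hi = min(tiles - 1, idx0 + radius)
--     # center-out ordering
--     out = []
--     for d in range(0, radius + 1):
--         a = idx0 - d
--         b = idx0 + d
--         if lo <= a <= hi: out.append(a)
--         if d != 0 and lo <= b <= hi: out.append(b)
--     # dedup while preserving order
--     seen = set()
--     out2 = []
--     for v in out:
--         if v not in seen: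
--             seen.add(v)
--             out2.append(v)
--     return out2
-- ===== SOURCE B (Python) =====
-- def _candidate_indices_around(idx0: int, tiles: int, radius: int = 4) -> list[int]:
--     lo = max(0, idx0 - radius)
--     hi = min(tiles - 1, idx0 + radius)
--     return sorted(range(lo, hi + 1), key=lambda v: (abs(v - idx0), v))
-- ===== Notes on version B (the rewrite author's own statement) =====
-- stated objective: simpler
-- what changed: Replaces the center-out interleaving loop plus explicit seen-set dedup with a single sort of range(lo, hi+1) by the key (abs(v-idx0), v), whose secondary key reproduces the lower-index-first tie-break.
import Mathlib
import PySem

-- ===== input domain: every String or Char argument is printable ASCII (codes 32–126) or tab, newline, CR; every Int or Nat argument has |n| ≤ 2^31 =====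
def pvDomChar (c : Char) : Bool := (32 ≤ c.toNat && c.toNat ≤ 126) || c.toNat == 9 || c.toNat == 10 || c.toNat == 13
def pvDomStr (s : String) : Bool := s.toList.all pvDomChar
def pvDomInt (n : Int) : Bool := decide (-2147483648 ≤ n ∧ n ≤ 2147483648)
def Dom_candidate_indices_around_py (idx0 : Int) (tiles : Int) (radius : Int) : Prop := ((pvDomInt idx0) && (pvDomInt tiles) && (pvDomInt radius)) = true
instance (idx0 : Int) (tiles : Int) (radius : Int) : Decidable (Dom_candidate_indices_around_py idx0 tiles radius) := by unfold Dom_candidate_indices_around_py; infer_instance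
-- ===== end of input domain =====

-- B replaces the center-out interleaving loop and the seen-set dedup pass by one sort of
-- range(lo, hi+1) with key (abs(v - idx0), v): a simpler, genuinely different decomposition.

-- ===== PORT A =====
def candidate_indices_around_py (idx0 : Int) (tiles : Int) (radius : Int) : List Int :=
  let lo : Int := max 0 (idx0 - radius)
  let hi : Int := min (tiles - 1) (idx0 + radius)
  -- center-out ordering
  let out : List Int :=
    (PySem.List.pyRange 0 (radius + 1) 1).foldl (fun out d =>
      let a := idx0 - d
      let b := idx0 + d
      let out := if lo ≤ a ∧ a ≤ hi then out ++ [a] else out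
      if d ≠ 0 ∧ lo ≤ b ∧ b ≤ hi then out ++ [b] else out) []
  -- dedup while preserving order
  let st : PySem.Set Int × List Int :=
    out.foldl (fun st v =>
      if PySem.Set.contains st.1 v = false then (PySem.Set.add st.1 v, st.2 ++ [v]) else st)
      (PySem.Set.empty, [])
  st.2

-- ===== PORT B =====
def candidate_indices_around_py_alt (idx0 : Int) (tiles : Int) (radius : Int) : List Int :=
  let lo : Int := max 0 (idx0 - radius)
  let hi : Int := min (tiles - 1) (idx0 + radius)
  PySem.List.sorted2 (PySem.List.pyRange lo (hi + 1) 1) (fun v => |v - idx0|) (fun v => v)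

-- ===== PRECONDITION & SPEC =====
def Spec_candidate_indices_around_py (idx0 : Int) (tiles : Int) (radius : Int) (out : List Int) : Prop := out = candidate_indices_around_py_alt idx0 tiles radius
instance (idx0 : Int) (tiles : Int) (radius : Int) (out : List Int) : Decidable (Spec_candidate_indices_around_py idx0 tiles radius out) := by unfold Spec_candidate_indices_around_py; infer_instance

-- ===== CLAIM (what is proved, stated in full; the proofs are below) =====
def Claim_equal_candidate_indices_around_py : Prop := ∀ (idx0 : Int) (tiles : Int) (radius : Int), Dom_candidate_indices_around_py idx0 tiles radius → Spec_candidate_indices_around_py idx0 tiles radius (candidate_indices_around_py idx0 tiles radius)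

-- ===== LEMMAS AND PROOFS =====

-- the per-distance contribution of A's first loop
def pvF (idx0 lo hi d : Int) : List Int :=
  (if lo ≤ idx0 - d ∧ idx0 - d ≤ hi then [idx0 - d] else []) ++
  (if d ≠ 0 ∧ lo ≤ idx0 + d ∧ idx0 + d ≤ hi then [idx0 + d] else [])

theorem mem_pvF_iff (idx0 lo hi d x : Int) :
    x ∈ pvF idx0 lo hi d ↔
      (lo ≤ idx0 - d ∧ idx0 - d ≤ hi ∧ x = idx0 - d) ∨
      (d ≠ 0 ∧ lo ≤ idx0 + d ∧ idx0 + d ≤ hi ∧ x = idx0 + d) := by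
  simp only [pvF, List.mem_append]
  constructor
  · rintro (h | h) <;> split_ifs at h <;> simp_all
  · rintro (⟨h1, h2, rfl⟩ | ⟨h1, h2, h3, rfl⟩)
    · left; rw [if_pos ⟨h1, h2⟩]; simp
    · right; rw [if_pos ⟨h1, h2, h3⟩]; simp

-- A's first loop, rewritten as a flatMap of per-distance blocks
theorem outA_eq_flatMap (idx0 lo hi : Int) (l : List Int) :
    l.foldl (fun out d =>
      let a := idx0 - d
      let b := idx0 + d
      let out := if lo ≤ a ∧ a ≤ hi then out ++ [a] else out
      if d ≠ 0 ∧ lo ≤ b ∧ b ≤ hi then out ++ [b] else out) []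
      = l.flatMap (pvF idx0 lo hi) := by
  have h : (fun (out : List Int) (d : Int) =>
      let a := idx0 - d
      let b := idx0 + d
      let out := if lo ≤ a ∧ a ≤ hi then out ++ [a] else out
      if d ≠ 0 ∧ lo ≤ b ∧ b ≤ hi then out ++ [b] else out)
      = fun out d => out ++ pvF idx0 lo hi d := by
    funext out d
    simp only [pvF]
    split_ifs <;> simp
  rw [h, PySem.List.foldl_append_eq_flatMap]
  simp

-- A's dedup loop is the identity on a Nodup list
theorem dedupFold_nodup (l : List Int) : ∀ (s : PySem.Set Int) (acc : List Int),
    (∀ x ∈ l, PySem.Set.contains s x = false) → l.Nodup →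
    (l.foldl (fun (st : PySem.Set Int × List Int) v =>
      if PySem.Set.contains st.1 v = false then (PySem.Set.add st.1 v, st.2 ++ [v]) else st)
      (s, acc)).2 = acc ++ l := by
  induction l with
  | nil => simp
  | cons v t ih =>
    intro s acc hs hnd
    have hv : PySem.Set.contains s v = false := hs v (by simp)
    simp only [List.foldl_cons, hv, if_true]
    rw [ih (PySem.Set.add s v) (acc ++ [v]) ?_ (List.Nodup.of_cons hnd)]
    · simp
    · intro x hx
      have hxv : x ≠ v := fun h => (List.nodup_cons.mp hnd).1 (h ▸ hx)
      have hsx : PySem.Set.contains s x = false := hs x (by simp [hx])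
      show PySem.Set.contains (PySem.Set.add s v) x = false
      unfold PySem.Set.add
      rw [if_neg (by simp [PySem.Set.contains] at hv ⊢; exact hv)]
      simp [PySem.Set.contains] at hsx ⊢
      exact ⟨hsx, hxv⟩

-- sorted with the lexicographic tuple key = sorted2
theorem sorted2_eq_sorted_lex (xs : List Int) (k1 k2 : Int → Int) :
    PySem.List.sorted2 xs k1 k2 = PySem.List.sorted xs (fun x => toLex (k1 x, k2 x)) := by
  simp only [PySem.List.sorted2, PySem.List.sorted, if_neg (by decide : ¬ (false = true))]
  have h : (fun a b => decide (k1 a < k1 b) || (!decide (k1 b < k1 a) && decide (k2 a < k2 b)))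
      = fun (a b : Int) => decide (toLex (k1 a, k2 a) < toLex (k1 b, k2 b)) := by
    funext a b
    rw [Bool.eq_iff_iff]
    simp [Prod.Lex.lt_iff]
    omega
  rw [h]

-- ===== VERDICT (by name: the statement is the Claim_ definition above) =====
theorem candidate_indices_around_py_spec : Claim_equal_candidate_indices_around_py := by
  intro idx0 tiles radius _
  unfold Spec_candidate_indices_around_py candidate_indices_around_py candidate_indices_around_py_alt
  simp only []
  set lo : Int := max 0 (idx0 - radius) with hlo
  set hi : Int := min (tiles - 1) (idx0 + radius) with hhi
  have hlo1 : idx0 - radius ≤ lo := le_max_right _ _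
  have hlo0 : 0 ≤ lo := le_max_left _ _
  have hhi1 : hi ≤ idx0 + radius := min_le_right _ _
  rw [outA_eq_flatMap, sorted2_eq_sorted_lex]
  rcases lt_or_ge radius 0 with hr | hr
  · -- radius < 0 : both loops run over empty ranges
    rw [PySem.List.pyRange_one_eq_nil (by omega), PySem.List.pyRange_one_eq_nil (by omega)]
    rfl
  · -- radius ≥ 0
    set ys : List Int := (PySem.List.pyRange 0 (radius + 1) 1).flatMap (pvF idx0 lo hi) with hys
    have hmemF : ∀ d x, 0 ≤ d → x ∈ pvF idx0 lo hi d → lo ≤ x ∧ x ≤ hi ∧ |x - idx0| = d := by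
      intro d x hd hx
      rw [mem_pvF_iff] at hx
      rcases hx with ⟨h1, h2, rfl⟩ | ⟨h1, h2, h3, rfl⟩ <;>
        refine ⟨by omega, by omega, ?_⟩ <;> rw [abs_eq hd] <;> omega
    have hpw : ys.Pairwise (fun a b =>
        (toLex ((|a - idx0| : Int), a) : Int ×ₗ Int) < toLex (|b - idx0|, b)) := by
      rw [hys, List.pairwise_flatMap]
      constructor
      · intro d hd
        rw [PySem.List.mem_pyRange_one] at hd
        simp only [pvF]
        split_ifs with h1 h2 h2
        · refine List.pairwise_append.mpr ⟨by simp, by simp, ?_⟩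
          intro x hx y hy
          simp only [List.mem_singleton] at hx hy
          subst hx; subst hy
          have e1 : |idx0 - d - idx0| = d := by rw [abs_eq (by omega : (0:Int) ≤ d)]; omega
          have e2 : |idx0 + d - idx0| = d := by rw [abs_eq (by omega : (0:Int) ≤ d)]; omega
          rw [Prod.Lex.lt_iff]
          right
          simp only [ofLex_toLex]
          exact ⟨by rw [e1, e2], by omega⟩
        · simp
        · simp
        · simp
      · refine (PySem.List.pairwise_lt_pyRange_one 0 (radius + 1)).imp_of_mem ?_
        intro d1 d2 hd1 hd2 hlt x hx y hy
        rw [PySem.List.mem_pyRange_one] at hd1 hd2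
        obtain ⟨_, _, hx3⟩ := hmemF d1 x hd1.1 hx
        obtain ⟨_, _, hy3⟩ := hmemF d2 y hd2.1 hy
        rw [Prod.Lex.lt_iff]
        left
        simpa [ofLex_toLex, hx3, hy3] using hlt
    have hnd : ys.Nodup := by
      refine hpw.imp ?_
      intro a b h hab
      subst hab
      exact absurd h (lt_irrefl _)
    have hperm : ys.Perm (PySem.List.pyRange lo (hi + 1) 1) := by
      refine (List.perm_ext_iff_of_nodup hnd (PySem.List.nodup_pyRange_one lo (hi + 1))).mpr ?_
      intro x
      rw [PySem.List.mem_pyRange_one, hys, List.mem_flatMap]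
      constructor
      · rintro ⟨d, hd, hx⟩
        rw [PySem.List.mem_pyRange_one] at hd
        obtain ⟨h1, h2, _⟩ := hmemF d x hd.1 hx
        omega
      · rintro ⟨h1, h2⟩
        by_cases hc : x ≤ idx0
        · refine ⟨idx0 - x, ?_, ?_⟩
          · rw [PySem.List.mem_pyRange_one]; omega
          · rw [mem_pvF_iff]; left; omega
        · refine ⟨x - idx0, ?_, ?_⟩
          · rw [PySem.List.mem_pyRange_one]; omega
          · rw [mem_pvF_iff]; right; omega
    have hA : (ys.foldl (fun (st : PySem.Set Int × List Int) v =>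
        if PySem.Set.contains st.1 v = false then (PySem.Set.add st.1 v, st.2 ++ [v]) else st)
        (PySem.Set.empty, ([] : List Int))).2 = ys := by
      rw [dedupFold_nodup ys PySem.Set.empty [] (by intro x _; rfl) hnd]
      simp
    rw [hA]
    exact (PySem.List.sorted_eq_of_perm_of_pairwise_lt _ ys _ hperm hpw).symm
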